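-- pv_equiv track=rewrite | github.com/mlbala/LeetCodeMasters | Hashmaps-and-Sets/Unique-Number-of-Occurrences/Unique-number-of-occurrences-1207.py | is_Unique_Occurrences
-- ===== SOURCE A (Python) =====
-- from collections import Counter
--
-- def is_Unique_Occurrences(arr: list[int]) -> bool:
--     counter = Counter(arr)
--     occurrences  =set()
--     for count in counter.values():
--         if count in occurrences :
--             return False
--         occurrences .add(count)
--     return True
-- ===== SOURCE B (Python) =====
-- from collections import Counter
--
-- def is_Unique_Occurrences(arr: list[int]) -> bool:
--     vals = sorted(Counter(arr).values())
--     for x, y in zip(vals, vals[1:]):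
--         if x == y:
--             return False
--     return True
-- ===== Notes on version B (the rewrite author's own statement) =====
-- stated objective: alternative
-- what changed: Replaces the incremental seen-set membership loop with a sort of the occurrence counts followed by a single adjacent-pair equality scan.
import Mathlib
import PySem

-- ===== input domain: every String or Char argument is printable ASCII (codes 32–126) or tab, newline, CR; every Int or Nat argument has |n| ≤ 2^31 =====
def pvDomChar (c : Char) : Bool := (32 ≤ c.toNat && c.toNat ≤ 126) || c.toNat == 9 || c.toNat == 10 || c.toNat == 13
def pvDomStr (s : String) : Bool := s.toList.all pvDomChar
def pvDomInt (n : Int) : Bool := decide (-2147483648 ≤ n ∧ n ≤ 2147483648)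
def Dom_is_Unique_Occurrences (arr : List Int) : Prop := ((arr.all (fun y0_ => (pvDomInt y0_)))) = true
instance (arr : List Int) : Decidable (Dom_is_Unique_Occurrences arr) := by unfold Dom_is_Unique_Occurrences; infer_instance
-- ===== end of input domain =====

-- B replaces A's incremental seen-set membership loop with a sort of the
-- occurrence counts followed by one adjacent-pair equality scan (alternative decomposition).


-- ===== PORT A =====
-- the 'for count in counter.values()' loop with early return and the seen set
def uoALoop : List Int → PySem.Set Int → Bool
  | [], _ => true
  | c :: cs, seen =>
      if PySem.Set.contains seen c then false
      else uoALoop cs (PySem.Set.add seen c)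

def is_Unique_Occurrences (arr : List Int) : Bool :=
  uoALoop (PySem.Dict.counter arr).values PySem.Set.empty

-- ===== PORT B =====
-- the 'for x, y in zip(vals, vals[1:])' adjacent-pair scan with early return
def uoBLoop : List (Int × Int) → Bool
  | [] => true
  | (x, y) :: rest => if x == y then false else uoBLoop rest

def is_Unique_Occurrences_alt (arr : List Int) : Bool :=
  let vals := PySem.List.sorted (PySem.Dict.counter arr).values (fun v => v) false
  uoBLoop (List.zip vals (PySem.List.slice vals (some 1) none))

-- ===== PRECONDITION & SPEC =====
def Spec_is_Unique_Occurrences (arr : List Int) (out : Bool) : Prop := out = is_Unique_Occurrences_alt arr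
instance (arr : List Int) (out : Bool) : Decidable (Spec_is_Unique_Occurrences arr out) := by unfold Spec_is_Unique_Occurrences; infer_instance

-- ===== CLAIM (what is proved, stated in full; the proofs are below) =====
def Claim_equal_is_Unique_Occurrences : Prop := ∀ (arr : List Int), Dom_is_Unique_Occurrences arr → Spec_is_Unique_Occurrences arr (is_Unique_Occurrences arr)

-- ===== LEMMAS AND PROOFS =====

-- A's loop succeeds exactly when the seen set extended by the remaining counts stays duplicate-free
lemma uoALoop_eq_true_iff (cs : List Int) (seen : PySem.Set Int) (hn : seen.Nodup) :
    uoALoop cs seen = true ↔ (seen ++ cs).Nodup := by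
  induction cs generalizing seen with
  | nil => simpa [uoALoop] using hn
  | cons c cs ih =>
      by_cases hc : c ∈ seen
      · have hct : PySem.Set.contains seen c = true := (PySem.Set.contains_iff seen c).mpr hc
        simp only [uoALoop, hct, if_true]
        constructor
        · intro h; simp at h
        · intro h
          exact (((List.nodup_append.mp h).2.2) c hc c List.mem_cons_self rfl).elim
      · have hcf : PySem.Set.contains seen c = false :=
          Bool.eq_false_iff.mpr (fun h => hc ((PySem.Set.contains_iff seen c).mp h))
        simp only [uoALoop, hcf, Bool.false_eq_true, if_false]
        rw [ih _ (PySem.Set.nodup_add seen c hn), PySem.Set.add_of_not_mem hc]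
        rw [show seen ++ [c] ++ cs = seen ++ c :: cs from by simp]

-- B's loop over the zipped list checks exactly that no two adjacent values are equal
lemma uoBLoop_eq_true_iff (vals : List Int) :
    uoBLoop (List.zip vals (PySem.List.slice vals (some 1) none)) = true ↔
      vals.IsChain (· ≠ ·) := by
  rw [show PySem.List.slice vals (some 1) none = vals.drop 1 from by
        simpa using PySem.List.slice_from_natCast (xs := vals) (a := 1)]
  induction vals with
  | nil => simp [uoBLoop]
  | cons x t ih =>
      cases t with
      | nil => simp [uoBLoop]
      | cons y r =>
          simp only [List.drop_one, List.tail_cons] at ih ⊢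
          simp only [List.zip_cons_cons, uoBLoop, List.isChain_cons_cons]
          by_cases hxy : x = y
          · simp [hxy]
          · have hb : (x == y) = false := by simpa using hxy
            rw [hb]
            simp only [Bool.false_eq_true, if_false]
            rw [ih]
            simp [hxy]

-- on a weakly increasing list, no equal adjacent pair ⟺ no duplicates
lemma isChain_ne_iff_nodup_of_sorted (vals : List Int)
    (hs : vals.Pairwise (fun a b => a ≤ b)) :
    vals.IsChain (· ≠ ·) ↔ vals.Nodup := by
  constructor
  · intro hne
    have hle : vals.IsChain (fun a b => a ≤ b) := List.isChain_iff_pairwise.mpr hs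
    have hlt : vals.IsChain (fun a b => a < b) := by
      rw [List.isChain_iff_getElem] at hle hne ⊢
      intro i h
      exact lt_of_le_of_ne (hle i h) (hne i h)
    exact (List.isChain_iff_pairwise.mp hlt).imp (fun h => ne_of_lt h)
  · intro hnd
    exact hnd.isChain

lemma is_Unique_Occurrences_eq (arr : List Int) :
    is_Unique_Occurrences arr = is_Unique_Occurrences_alt arr := by
  rw [Bool.eq_iff_iff]
  unfold is_Unique_Occurrences is_Unique_Occurrences_alt
  rw [uoALoop_eq_true_iff _ _ (by simp [PySem.Set.empty]), uoBLoop_eq_true_iff,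
    isChain_ne_iff_nodup_of_sorted _ (PySem.List.sorted_pairwise _ _)]
  simp only [PySem.Set.empty, List.nil_append]
  exact Iff.symm
    ((PySem.List.sorted_perm (PySem.Dict.counter arr).values (fun v => v) false).nodup_iff)

-- ===== VERDICT (by name: the statement is the Claim_ definition above) =====
theorem is_Unique_Occurrences_spec : Claim_equal_is_Unique_Occurrences := by
  intro arr _
  unfold Spec_is_Unique_Occurrences
  exact is_Unique_Occurrences_eq arr
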